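-- pv_equiv track=rewrite | github.com/python-devoloper-srikanth/Brake_Accelerator | event_recognition/algs/helpers/find_driver_demand.py | find_last_n_trues
-- ===== SOURCE A (Python) =====
-- def find_last_n_trues(bools, last_n_trues):
--     result = bools[:]
--     count = 0
--     for i in range(len(bools) - 1, -1, -1):
--         if count < last_n_trues:
--             if result[i]:
--                 count += 1
--         else:
--             result[i] = False
--
--     return result, result.index(True)
-- ===== SOURCE B (Python) =====
-- def find_last_n_trues(bools, last_n_trues):
--     idx = [i for i, v in enumerate(bools) if v]
--     if last_n_trues >= 1 and len(idx) > last_n_trues: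
--         start = idx[-last_n_trues]
--         result = [False] * start + bools[start:]
--     elif last_n_trues <= 0:
--         result = [False] * len(bools)
--     else:
--         result = bools[:]
--     return result, result.index(True)
-- ===== Notes on version B (the rewrite author's own statement) =====
-- stated objective: alternative
-- what changed: Replaces A's backward element-by-element loop that counts trues and zeroes entries in place with a forward index-gathering pass: collect the indices of all trues once, pick the cut point idx[-last_n_trues], and build the result as [False]*start + bools[start:] (or all-False / a plain copy in the boundary cases).
import Mathlib
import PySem

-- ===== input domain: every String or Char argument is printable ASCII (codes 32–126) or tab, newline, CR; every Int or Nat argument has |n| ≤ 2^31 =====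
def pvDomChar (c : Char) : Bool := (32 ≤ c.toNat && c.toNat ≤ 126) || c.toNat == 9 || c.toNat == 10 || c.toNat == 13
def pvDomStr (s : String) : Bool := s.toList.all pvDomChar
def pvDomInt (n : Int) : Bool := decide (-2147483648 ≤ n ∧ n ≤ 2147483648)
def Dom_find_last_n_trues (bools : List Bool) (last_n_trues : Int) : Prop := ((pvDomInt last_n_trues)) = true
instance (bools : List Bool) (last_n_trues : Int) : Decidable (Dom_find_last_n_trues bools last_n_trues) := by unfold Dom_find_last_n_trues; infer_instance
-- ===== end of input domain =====

-- B keeps the last `last_n_trues` trues by one forward index-gathering pass and a slice,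
-- instead of A's backward in-place zeroing loop (objective: alternative decomposition).

-- ===== PORT A =====
def find_last_n_trues (bools : List Bool) (last_n_trues : Int) : List Bool × Int :=
  let st := (PySem.List.pyRange ((bools.length : Int) - 1) (-1) (-1)).foldl
    (fun (st : List Bool × Int) i =>
      if st.2 < last_n_trues then
        if PySem.List.pyGetD st.1 i false then (st.1, st.2 + 1) else st
      else
        (PySem.List.pySetD st.1 i false, st.2))
    (bools, 0)
  -- result.index(True): raises ValueError when no True remains; excluded by Pre_
  (st.1, match PySem.List.index? st.1 true with | some k => (k : Int) | none => 0)

-- ===== PORT B =====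
def find_last_n_trues_alt (bools : List Bool) (last_n_trues : Int) : List Bool × Int :=
  let idx := (PySem.List.enumerate bools 0).filterMap (fun p => if p.2 then some p.1 else none)
  let result :=
    if 1 ≤ last_n_trues ∧ last_n_trues < (idx.length : Int) then
      let start := PySem.List.pyGetD idx (-last_n_trues) 0
      List.replicate start.toNat false ++ PySem.List.slice bools (some start) none
    else if last_n_trues ≤ 0 then
      List.replicate bools.length false
    else
      bools
  -- result.index(True): raises ValueError when no True remains; excluded by Pre_
  (result, match PySem.List.index? result true with | some k => (k : Int) | none => 0)

-- ===== PRECONDITION & SPEC =====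
-- A raises ValueError (result.index(True) on an all-False result) iff last_n_trues < 1
-- or bools contains no True; exactly those inputs are excluded.
def Pre_find_last_n_trues (bools : List Bool) (last_n_trues : Int) : Prop :=
  1 ≤ last_n_trues ∧ true ∈ bools
instance (bools : List Bool) (last_n_trues : Int) : Decidable (Pre_find_last_n_trues bools last_n_trues) := by unfold Pre_find_last_n_trues; infer_instance

def pvWitness_find_last_n_trues : List Bool × Int := ([true, false, true, true], 2)

def Spec_find_last_n_trues (bools : List Bool) (last_n_trues : Int) (out : List Bool × Int) : Prop := out = find_last_n_trues_alt bools last_n_trues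
instance (bools : List Bool) (last_n_trues : Int) (out : List Bool × Int) : Decidable (Spec_find_last_n_trues bools last_n_trues out) := by unfold Spec_find_last_n_trues; infer_instance

-- ===== CLAIM (what is proved, stated in full; the proofs are below) =====
def Claim_equal_find_last_n_trues : Prop := ∀ (bools : List Bool) (last_n_trues : Int), Dom_find_last_n_trues bools last_n_trues → Pre_find_last_n_trues bools last_n_trues → Spec_find_last_n_trues bools last_n_trues (find_last_n_trues bools last_n_trues)

-- ===== LEMMAS AND PROOFS =====

-- Right-to-left recursion capturing A's backward loop: process the tail (higher
-- indices) first, then the head.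
def pvG (keep : Int) : List Bool → List Bool × Int
  | [] => ([], 0)
  | b :: bs =>
    let r := pvG keep bs
    if r.2 < keep then (b :: r.1, if b then r.2 + 1 else r.2) else (false :: r.1, r.2)

-- position of the keep-th-from-last true (defined when keep ≤ count of trues)
def pvS (keep : Nat) : List Bool → Nat
  | [] => 0
  | b :: bs => if keep ≤ bs.count true then pvS keep bs + 1 else (if b then 0 else 0)

theorem pvG_loop (keep : Int) : ∀ (bs pre : List Bool),
    List.foldr (fun (i : Nat) (st : List Bool × Int) =>
      if st.2 < keep then
        if PySem.List.pyGetD st.1 (i : Int) false then (st.1, st.2 + 1) else st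
      else
        (PySem.List.pySetD st.1 (i : Int) false, st.2))
      (pre ++ bs, 0) (List.range' pre.length bs.length)
    = (pre ++ (pvG keep bs).1, (pvG keep bs).2) := by
  intro bs
  induction bs with
  | nil => intro pre; simp [pvG]
  | cons b bs ih =>
    intro pre
    have h1 : List.range' pre.length (b :: bs).length
        = pre.length :: List.range' (pre ++ [b]).length bs.length := by
      simp [List.range'_succ]
    rw [h1, List.foldr_cons]
    have h2 : pre ++ b :: bs = (pre ++ [b]) ++ bs := by simp
    rw [h2, ih (pre ++ [b])]
    have hget : PySem.List.pyGetD (pre ++ [b] ++ (pvG keep bs).1) ((pre.length : Int)) false = b := by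
      rw [PySem.List.pyGetD_natCast]
      simp [List.getD, List.getElem?_append_right]
    have hset : (pre ++ [b] ++ (pvG keep bs).1).set pre.length false
        = pre ++ [false] ++ (pvG keep bs).1 := by
      rw [List.append_assoc, List.append_assoc, List.set_append_right _ _ (le_refl _)]
      simp
    simp only [pvG]
    by_cases hc : (pvG keep bs).2 < keep
    · simp only [hc, if_pos, hget]
      cases b <;> simp
    · simp only [hc, if_neg, if_false, PySem.List.pySetD_natCast, Int.toNat_natCast, hset]
      simp

theorem pvG_eq_A_loop (bools : List Bool) (keep : Int) :
    (PySem.List.pyRange ((bools.length : Int) - 1) (-1) (-1)).foldl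
      (fun (st : List Bool × Int) i =>
        if st.2 < keep then
          if PySem.List.pyGetD st.1 i false then (st.1, st.2 + 1) else st
        else
          (PySem.List.pySetD st.1 i false, st.2))
      (bools, 0) = pvG keep bools := by
  rw [show ((bools.length : Int) - 1) = (-1) + (bools.length : Int) by ring]
  rw [show PySem.List.pyRange ((-1) + (bools.length : Int)) (-1) (-1)
      = (PySem.List.pyRange 0 (bools.length : Int) 1).reverse by
    rw [PySem.List.pyRange_neg_one_eq_reverse]; norm_num]
  rw [List.foldl_reverse, PySem.List.pyRange_zero_natCast, List.foldr_map]
  have := pvG_loop keep bools []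
  simpa [List.range_eq_range'] using this

theorem pvG_le (keep : Int) : ∀ (bs : List Bool), (bs.count true : Int) ≤ keep →
    pvG keep bs = (bs, (bs.count true : Int)) := by
  intro bs
  induction bs with
  | nil => intro _; simp [pvG]
  | cons b bs ih =>
    intro h
    have hbs : (bs.count true : Int) ≤ keep := by
      cases b <;> simp [List.count_cons] at h ⊢ <;> omega
    simp only [pvG, ih hbs]
    cases b with
    | false =>
      by_cases hc : (bs.count true : Int) < keep <;>
        simp [hc, List.count_cons]
    | true =>
      have hc : (bs.count true : Int) < keep := by
        simp [List.count_cons] at h; omega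
      simp [hc, List.count_cons]

theorem pvG_gt (keep : Int) (hk : 1 ≤ keep) : ∀ (bs : List Bool),
    keep ≤ (bs.count true : Int) →
    pvG keep bs = (List.replicate (pvS keep.toNat bs) false
        ++ bs.drop (pvS keep.toNat bs), keep) := by
  intro bs
  induction bs with
  | nil =>
    intro h; simp at h; omega
  | cons b bs ih =>
    intro h
    by_cases hbs : keep ≤ (bs.count true : Int)
    · -- the cut lies in the tail
      have hS : pvS keep.toNat (b :: bs) = pvS keep.toNat bs + 1 := by
        simp only [pvS, if_pos (show keep.toNat ≤ bs.count true by omega)]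
      simp only [pvG, ih hbs, hS]
      simp [show ¬ (keep < keep) by omega, List.replicate_succ]
    · -- the head is the keep-th-from-last true: count bs = keep - 1 and b = true
      have hcnt : (bs.count true : Int) = keep - 1 := by
        cases b <;> simp [List.count_cons] at h <;> omega
      have hb : b = true := by
        cases b
        · simp [List.count_cons] at h; omega
        · rfl
      have hS : pvS keep.toNat (b :: bs) = 0 := by
        simp only [pvS, if_neg (show ¬ keep.toNat ≤ bs.count true by omega)]
        cases b <;> rfl
      simp only [pvG, pvG_le keep bs (by omega), hS, hcnt]
      subst hb
      simp [show keep - 1 < keep by omega]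

-- the list of indices of trues, as built by B's comprehension
theorem pvIdx_cons (b : Bool) (bs : List Bool) (s : Int) :
    (PySem.List.enumerate (b :: bs) s).filterMap (fun p => if p.2 then some p.1 else none)
    = (if b then [s] else [])
      ++ (PySem.List.enumerate bs (s + 1)).filterMap (fun p => if p.2 then some p.1 else none) := by
  rw [PySem.List.enumerate_cons]
  cases b <;> simp

theorem pvIdx_length : ∀ (bs : List Bool) (s : Int),
    ((PySem.List.enumerate bs s).filterMap (fun p => if p.2 then some p.1 else none)).length
    = bs.count true := by
  intro bs
  induction bs with
  | nil => intro s; simp [PySem.List.enumerate_nil]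
  | cons b bs ih =>
    intro s
    rw [pvIdx_cons]
    cases b <;> simp [ih, List.count_cons]

theorem pvIdx_get (keep : Nat) (hk : 1 ≤ keep) : ∀ (bs : List Bool) (s : Int),
    keep ≤ bs.count true →
    ((PySem.List.enumerate bs s).filterMap (fun p => if p.2 then some p.1 else none))[bs.count true - keep]?
    = some (s + (pvS keep bs : Int)) := by
  intro bs
  induction bs with
  | nil => intro s h; simp at h; omega
  | cons b bs ih =>
    intro s h
    rw [pvIdx_cons]
    by_cases hbs : keep ≤ bs.count true
    · have hS : pvS keep (b :: bs) = pvS keep bs + 1 := by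
        simp only [pvS, if_pos hbs]
      have h1 := ih (s + 1) hbs
      cases b
      · have hc : (false :: bs).count true = bs.count true := by simp
        rw [hc, hS]
        simp only [Bool.false_eq_true, if_false, List.nil_append]
        rw [h1]
        congr 1
        push_cast
        ring
      · have hc : (true :: bs).count true - keep = (bs.count true - keep) + 1 := by
          simp [List.count_cons]; omega
        rw [hc, hS]
        simp only [if_pos, List.cons_append, List.nil_append, List.getElem?_cons_succ]
        rw [h1]
        congr 1
        push_cast
        ring
    · -- head is the cut: count bs = keep - 1, b = true, index 0
      have hcnt : bs.count true = keep - 1 := by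
        cases b <;> simp [List.count_cons] at h <;> omega
      have hb : b = true := by
        cases b
        · simp [List.count_cons] at h; omega
        · rfl
      have hS : pvS keep (b :: bs) = 0 := by
        simp only [pvS, if_neg hbs]; cases b <;> rfl
      subst hb
      have hz : (true :: bs).count true - keep = 0 := by
        simp [List.count_cons]; omega
      rw [hz, hS]
      simp

theorem pvA_result (bools : List Bool) (keep : Int) :
    find_last_n_trues bools keep
    = ((pvG keep bools).1,
       match PySem.List.index? (pvG keep bools).1 true with
       | some k => (k : Int) | none => 0) := by
  unfold find_last_n_trues
  rw [pvG_eq_A_loop]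

theorem pvB_result (bools : List Bool) (keep : Int) (hk : 1 ≤ keep) :
    find_last_n_trues_alt bools keep
    = ((pvG keep bools).1,
       match PySem.List.index? (pvG keep bools).1 true with
       | some k => (k : Int) | none => 0) := by
  obtain ⟨kn, rfl⟩ : ∃ kn : Nat, keep = (kn : Int) :=
    ⟨keep.toNat, (Int.toNat_of_nonneg (by omega)).symm⟩
  unfold find_last_n_trues_alt
  have hlen : ((PySem.List.enumerate bools 0).filterMap
      (fun p => if p.2 then some p.1 else none)).length = bools.count true :=
    pvIdx_length bools 0
  by_cases hc : (kn : Int) < (bools.count true : Int)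
  · have hcond : 1 ≤ (kn : Int) ∧ (kn : Int) < (((PySem.List.enumerate bools 0).filterMap
        (fun p => if p.2 then some p.1 else none)).length : Int) := ⟨hk, by rw [hlen]; exact hc⟩
    simp only [if_pos hcond]
    have hget? : ((PySem.List.enumerate bools 0).filterMap
        (fun p => if p.2 then some p.1 else none))[((PySem.List.enumerate bools 0).filterMap
        (fun p => if p.2 then some p.1 else none)).length - kn]?
        = some ((pvS kn bools : Int)) := by
      rw [hlen]
      have := pvIdx_get kn (by omega) bools 0 (by omega)
      simpa using this
    have hstart : PySem.List.pyGetD ((PySem.List.enumerate bools 0).filterMap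
        (fun p => if p.2 then some p.1 else none)) (-(kn : Int)) 0
        = ((pvS kn bools : Nat) : Int) := by
      rw [PySem.List.pyGetD_neg_natCast _ _ _ (by omega) (by rw [hlen]; omega)]
      rw [List.getElem?_eq_getElem (by rw [hlen]; omega)] at hget?
      simpa using hget?
    rw [hstart]
    rw [pvG_gt (kn : Int) hk bools (by omega)]
    simp [PySem.List.slice_from_natCast]
  · have hcond : ¬ (1 ≤ (kn : Int) ∧ (kn : Int) < (((PySem.List.enumerate bools 0).filterMap
        (fun p => if p.2 then some p.1 else none)).length : Int)) := by
      rw [hlen]; intro ⟨_, h2⟩; omega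
    simp only [if_neg hcond, if_neg (show ¬ (kn : Int) ≤ 0 by omega)]
    rw [pvG_le (kn : Int) bools (by omega)]

-- ===== VERDICT (by name: the statement is the Claim_ definition above) =====
theorem find_last_n_trues_spec : Claim_equal_find_last_n_trues := by
  intro bools keep _ hpre
  unfold Spec_find_last_n_trues
  rw [pvA_result, pvB_result bools keep hpre.1]
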